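-- pv_equiv track=rewrite | github.com/BlackOtto9911/kronecker_algorithm | kronecker_algorithm_ver_4.py | print_polynomial_ver_4
-- ===== SOURCE A (Python) =====
-- def print_polynomial_ver_4(p):
--     if not p:
--         return "0"
--
--     result = ""
--     for i in range(len(p) - 1, -1, -1):
--         if p[i] != 0:
--             k = str(abs(p[i]))
--             if abs(p[i]) == 1 and i != 0:
--                 k = ''
--
--             if i == 0: result += k
--             elif i == 1: result += k + 'x'
--             else: result += k + 'x^' + str(i)
--
--             if i != 0:
--                 if i > 0:
--                     # Проверяем следующий коэффициент
--                     next_nonzero = False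
--                     for j in range(i - 1, -1, -1):
--                         if p[j] != 0:
--                             next_nonzero = True
--                             if p[j] > 0: result += ' + '
--                             else: result += ' - '
--                             break
--     if result == "":
--         result = "0"
--
--     return result
-- ===== SOURCE B (Python) =====
-- # B: collect nonzero terms high-to-low, then format first term and join the
-- # rest with sign separators -- drops A's inner next-nonzero lookahead loop (objective: simpler).
-- def print_polynomial_ver_4(p):
--     terms = [(i, p[i]) for i in range(len(p) - 1, -1, -1) if p[i] != 0]
--     if not terms:
--         return "0"
--
--     def fmt(i, c):
--         k = str(abs(c))
--         if abs(c) == 1 and i != 0: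
--             k = ''
--         if i == 0:
--             return k
--         if i == 1:
--             return k + 'x'
--         return k + 'x^' + str(i)
--
--     parts = [fmt(*terms[0])]
--     for i, c in terms[1:]:
--         parts.append(' + ' if c > 0 else ' - ')
--         parts.append(fmt(i, c))
--     return ''.join(parts)
-- ===== Notes on version B (the rewrite author's own statement) =====
-- stated objective: simpler
-- what changed: B collects the nonzero (index, coeff) terms in one descending scan and joins them with per-term sign separators, eliminating A's quadratic inner next-nonzero lookahead loop.
import Mathlib
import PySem

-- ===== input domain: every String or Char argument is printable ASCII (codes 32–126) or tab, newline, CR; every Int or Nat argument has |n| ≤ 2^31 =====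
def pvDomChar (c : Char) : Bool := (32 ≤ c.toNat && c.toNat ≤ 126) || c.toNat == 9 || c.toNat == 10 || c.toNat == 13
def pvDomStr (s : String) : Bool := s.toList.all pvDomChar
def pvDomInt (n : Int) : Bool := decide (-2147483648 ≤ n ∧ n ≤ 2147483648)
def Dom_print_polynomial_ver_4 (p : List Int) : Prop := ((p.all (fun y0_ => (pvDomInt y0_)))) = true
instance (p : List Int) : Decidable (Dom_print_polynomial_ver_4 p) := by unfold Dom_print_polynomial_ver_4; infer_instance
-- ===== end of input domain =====

-- B collects the nonzero terms once and joins them with sign separators; A's inner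
-- next-nonzero lookahead loop disappears (objective: simpler; return value only, no mutation).

-- ===== PORT A =====
-- inner lookahead loop: for j in range(i-1,-1,-1): first nonzero decides the separator
def pvAInner (p : List Int) : Nat → String
  | 0 => ""
  | j + 1 =>
    if p.getD j 0 ≠ 0 then (if p.getD j 0 > 0 then " + " else " - ")
    else pvAInner p j

-- the main loop: i from len(p)-1 down to 0, accumulating into `res`
def pvALoop (p : List Int) : Nat → String → String
  | 0, res => res
  | i + 1, res =>
    if p.getD i 0 ≠ 0 then
      let k := PySem.Int.toStr |p.getD i 0|
      let k := if |p.getD i 0| = 1 ∧ i ≠ 0 then "" else k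
      let res :=
        if i = 0 then res ++ k
        else if i = 1 then res ++ k ++ "x"
        else res ++ k ++ "x^" ++ PySem.Int.toStr (i : Int)
      let res := if i ≠ 0 then res ++ pvAInner p i else res
      pvALoop p i res
    else pvALoop p i res

def print_polynomial_ver_4 (p : List Int) : String :=
  if p = [] then "0"
  else
    let res := pvALoop p p.length ""
    if res = "" then "0" else res

-- ===== PORT B =====
-- terms = [(i, p[i]) for i in range(len(p)-1, -1, -1) if p[i] != 0]
def pvBTerms (p : List Int) : Nat → List (Nat × Int)
  | 0 => []
  | i + 1 =>
    if p.getD i 0 ≠ 0 then (i, p.getD i 0) :: pvBTerms p i else pvBTerms p i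

-- fmt(i, c): abs-valued string of one term
def pvBFmt (t : Nat × Int) : String :=
  let k := PySem.Int.toStr |t.2|
  let k := if |t.2| = 1 ∧ t.1 ≠ 0 then "" else k
  if t.1 = 0 then k
  else if t.1 = 1 then k ++ "x"
  else k ++ "x^" ++ PySem.Int.toStr (t.1 : Int)

def print_polynomial_ver_4_alt (p : List Int) : String :=
  match pvBTerms p p.length with
  | [] => "0"
  | t :: rest =>
    rest.foldl (fun acc u => acc ++ (if u.2 > 0 then " + " else " - ") ++ pvBFmt u) (pvBFmt t)

-- ===== PRECONDITION & SPEC =====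
def Spec_print_polynomial_ver_4 (p : List Int) (out : String) : Prop := out = print_polynomial_ver_4_alt p
instance (p : List Int) (out : String) : Decidable (Spec_print_polynomial_ver_4 p out) := by unfold Spec_print_polynomial_ver_4; infer_instance

-- ===== CLAIM (what is proved, stated in full; the proofs are below) =====
def Claim_equal_print_polynomial_ver_4 : Prop := ∀ (p : List Int), Dom_print_polynomial_ver_4 p → Spec_print_polynomial_ver_4 p (print_polynomial_ver_4 p)

-- ===== LEMMAS AND PROOFS =====

-- separator contributed by the first element of a term list
def pvSep (l : List (Nat × Int)) : String :=
  match l with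
  | [] => ""
  | t :: _ => if t.2 > 0 then " + " else " - "

-- the string B emits for all terms after the first
def pvTail (l : List (Nat × Int)) : String :=
  match l with
  | [] => ""
  | t :: rest => (if t.2 > 0 then " + " else " - ") ++ pvBFmt t ++ pvTail rest

-- full B rendering of a term list
def pvChain (l : List (Nat × Int)) : String :=
  match l with
  | [] => ""
  | t :: rest => pvBFmt t ++ pvTail rest

theorem pv_app_assoc (a b c : String) : a ++ b ++ c = a ++ (b ++ c) := by
  apply String.ext; simp

theorem pvAInner_eq (p : List Int) : ∀ i, pvAInner p i = pvSep (pvBTerms p i) := by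
  intro i
  induction i with
  | zero => rfl
  | succ j ih =>
    simp only [pvAInner, pvBTerms]
    split
    · simp only [pvSep]
    · exact ih

theorem pvSep_chain (l : List (Nat × Int)) : pvSep l ++ pvChain l = pvTail l := by
  cases l with
  | nil => apply String.ext; simp [pvSep, pvChain, pvTail]
  | cons t rest =>
    simp only [pvSep, pvChain, pvTail]
    rw [pv_app_assoc]

theorem pvALoop_concat (p : List Int) :
    ∀ (i : Nat) (a b : String), pvALoop p i (a ++ b) = a ++ pvALoop p i b := by
  intro i
  induction i with
  | zero => intro a b; rfl
  | succ i ih =>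
    intro a b
    simp only [pvALoop]
    split
    · split_ifs <;> (simp only [pv_app_assoc]; rw [ih])
    · exact ih a b

theorem pvALoop_shift (p : List Int) (i : Nat) (res : String) :
    pvALoop p i res = res ++ pvALoop p i "" := by
  have h : res ++ "" = res := by apply String.ext; simp
  conv_lhs => rw [← h]
  rw [pvALoop_concat]

theorem pvALoop_eq (p : List Int) : ∀ i, pvALoop p i "" = pvChain (pvBTerms p i) := by
  intro i
  induction i with
  | zero => rfl
  | succ i ih =>
    simp only [pvALoop, pvBTerms]
    split
    · rw [pvALoop_shift, ih]
      by_cases hi : i = 0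
      · subst hi
        have h0 : pvBTerms p 0 = [] := rfl
        simp only [h0, pvChain, pvTail, pvBFmt]
        split_ifs <;> (apply String.ext; simp) <;> simp_all
      · rw [show pvChain ((i, p.getD i 0) :: pvBTerms p i)
              = pvBFmt (i, p.getD i 0) ++ pvTail (pvBTerms p i) from rfl,
            ← pvSep_chain, ← pvAInner_eq]
        simp only [pvBFmt]
        split_ifs <;> (apply String.ext; simp)
    · exact ih

theorem pvFoldl_tail (l : List (Nat × Int)) :
    ∀ acc, l.foldl (fun acc u => acc ++ (if u.2 > 0 then " + " else " - ") ++ pvBFmt u) acc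
      = acc ++ pvTail l := by
  induction l with
  | nil => intro acc; simp only [List.foldl, pvTail]; apply String.ext; simp
  | cons t rest ih =>
    intro acc
    simp only [List.foldl, pvTail, ih]
    apply String.ext; simp

theorem pv_tdc_len_ge (b : Nat) : ∀ (f n : Nat) (l : List Char),
    l.length ≤ (Nat.toDigitsCore b f n l).length := by
  intro f
  induction f with
  | zero => intro n l; simp [Nat.toDigitsCore]
  | succ f ih =>
    intro n l
    simp only [Nat.toDigitsCore]
    split
    · simp
    · have := ih (n / b) (Nat.digitChar (n % b) :: l)
      simp at this; omega

theorem pvToChars_ne_nil (n : Int) : PySem.Int.toChars n ≠ [] := by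
  unfold PySem.Int.toChars Nat.toDigits
  split
  · simp
  · simp only [Nat.toDigitsCore]
    split
    · simp
    · have := pv_tdc_len_ge 10 n.toNat (n.toNat / 10) [Nat.digitChar (n.toNat % 10)]
      intro h; rw [h] at this; simp at this

theorem pvBFmt_ne_empty (t : Nat × Int) : (pvBFmt t).toList ≠ [] := by
  simp only [pvBFmt]
  split_ifs <;> simp_all
  exact pvToChars_ne_nil _

theorem pvChain_cons_ne_empty (t : Nat × Int) (rest : List (Nat × Int)) :
    pvChain (t :: rest) ≠ "" := by
  simp only [pvChain]
  intro h
  have h' : (pvBFmt t ++ pvTail rest).toList = ("" : String).toList := by rw [h]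
  simp at h'
  exact pvBFmt_ne_empty t (by rw [h'.1]; rfl)

theorem pvBTerms_nil (p : List Int) (h : p = []) : pvBTerms p p.length = [] := by
  subst h; rfl

-- ===== VERDICT (by name: the statement is the Claim_ definition above) =====
theorem print_polynomial_ver_4_spec : Claim_equal_print_polynomial_ver_4 := by
  intro p _
  unfold Spec_print_polynomial_ver_4 print_polynomial_ver_4 print_polynomial_ver_4_alt
  by_cases hp : p = []
  · rw [if_pos hp, pvBTerms_nil p hp]
  · rw [if_neg hp]
    simp only [pvALoop_eq]
    cases h : pvBTerms p p.length with
    | nil => simp [pvChain]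
    | cons t rest =>
      rw [if_neg (pvChain_cons_ne_empty t rest)]
      simp only [pvChain, pvFoldl_tail]
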